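-- pv_equiv track=rewrite | github.com/YashDhirajOza/ALGO | 1264-maximum-number-of-words-you-can-type/maximum-number-of-words-you-can-type.py | canBeTypedWords
-- ===== SOURCE A (Python) =====
-- def canBeTypedWords(text: str, brokenLetters: str) -> int:
--     words = text.split()
--     broken_set = set(brokenLetters)
--     count = 0
--     for word in words:
--         if not any(letter in broken_set for letter in word):
--             count += 1
--     return count
-- ===== SOURCE B (Python) =====
-- def canBeTypedWords(text: str, brokenLetters: str) -> int:
--     broken = set(brokenLetters)
--     count = 0
--     in_word = False
--     word_ok = True
--     for c in text:
--         if c.isspace():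
--             if in_word and word_ok:
--                 count += 1
--             in_word = False
--             word_ok = True
--         else:
--             in_word = True
--             word_ok = word_ok and c not in broken
--     if in_word and word_ok:
--         count += 1
--     return count
-- ===== Notes on version B (the rewrite author's own statement) =====
-- stated objective: alternative
-- what changed: Replaces text.split() plus a per-word inner scan with a single character pass maintaining running in_word/word_ok state, never materializing the word list.
import Mathlib
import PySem

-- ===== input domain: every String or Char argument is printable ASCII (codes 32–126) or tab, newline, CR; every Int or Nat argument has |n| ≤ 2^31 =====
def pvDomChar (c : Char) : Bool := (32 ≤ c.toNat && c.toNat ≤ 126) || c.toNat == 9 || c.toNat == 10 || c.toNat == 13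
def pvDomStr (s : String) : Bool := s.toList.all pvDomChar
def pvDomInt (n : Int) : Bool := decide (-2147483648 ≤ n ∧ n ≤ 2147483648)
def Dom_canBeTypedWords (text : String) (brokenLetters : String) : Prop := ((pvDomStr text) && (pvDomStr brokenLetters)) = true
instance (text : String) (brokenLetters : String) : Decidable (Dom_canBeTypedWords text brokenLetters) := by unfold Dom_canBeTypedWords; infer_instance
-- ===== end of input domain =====

-- B replaces text.split() plus a per-word scan with a single character pass keeping
-- running in_word/word_ok state (objective: alternative decomposition, same cost).

-- ===== PORT A =====
def canBeTypedWords (text : String) (brokenLetters : String) : Int :=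
  let words := PySem.Str.split₀ text
  let brokenSet : PySem.Set Char := PySem.Set.ofList brokenLetters.toList
  let count : Int := words.foldl
    (fun count word =>
      if ¬ (word.toList.any (fun letter => PySem.Set.contains brokenSet letter)) = true
      then count + 1 else count) 0
  count

-- ===== PORT B =====
def canBeTypedWords_alt (text : String) (brokenLetters : String) : Int :=
  let broken : PySem.Set Char := PySem.Set.ofList brokenLetters.toList
  let st : Int × Bool × Bool := text.toList.foldl
    (fun (st : Int × Bool × Bool) c =>
      if PySem.Chars.isspace c then
        ((if st.2.1 && st.2.2 then st.1 + 1 else st.1), false, true)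
      else
        (st.1, true, st.2.2 && !(PySem.Set.contains broken c)))
    (0, false, true)
  if st.2.1 && st.2.2 then st.1 + 1 else st.1

-- ===== PRECONDITION & SPEC =====
def Spec_canBeTypedWords (text : String) (brokenLetters : String) (out : Int) : Prop := out = canBeTypedWords_alt text brokenLetters
instance (text : String) (brokenLetters : String) (out : Int) : Decidable (Spec_canBeTypedWords text brokenLetters out) := by unfold Spec_canBeTypedWords; infer_instance

-- ===== CLAIM (what is proved, stated in full; the proofs are below) =====
def Claim_equal_canBeTypedWords : Prop := ∀ (text : String) (brokenLetters : String), Dom_canBeTypedWords text brokenLetters → Spec_canBeTypedWords text brokenLetters (canBeTypedWords text brokenLetters)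

-- ===== LEMMAS AND PROOFS =====

-- A word is "ok" if it contains no broken letter.
def pvOk (broken : PySem.Set Char) (w : List Char) : Bool :=
  !(w.any (fun letter => PySem.Set.contains broken letter))

-- B's loop body.
def pvStep (broken : PySem.Set Char) (st : Int × Bool × Bool) (c : Char) : Int × Bool × Bool :=
  if PySem.Chars.isspace c then
    ((if st.2.1 && st.2.2 then st.1 + 1 else st.1), false, true)
  else
    (st.1, true, st.2.2 && !(PySem.Set.contains broken c))

-- split₀.go with accumulator acc prepends acc.reverse.
theorem go_acc (rest cur : List Char) (acc : List (List Char)) :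
    PySem.Chars.split₀.go rest cur acc = acc.reverse ++ PySem.Chars.split₀.go rest cur [] := by
  induction rest generalizing cur acc with
  | nil =>
    simp only [PySem.Chars.split₀.go]
    split <;> simp
  | cons c rest ih =>
    simp only [PySem.Chars.split₀.go]
    split
    · split
      · rw [ih _ acc]
      · rw [ih _ (cur.reverse :: acc), ih _ [cur.reverse]]
        simp
    · exact ih _ acc

-- A's foldl counts the ok words, shifted by the start value.
theorem foldA_count (broken : PySem.Set Char) (ws : List (List Char)) (n : Int) :
    ws.foldl (fun count w => if ¬ (w.any (fun l => PySem.Set.contains broken l)) = true then count + 1 else count) n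
      = n + ((ws.countP (pvOk broken) : Nat) : Int) := by
  induction ws generalizing n with
  | nil => simp
  | cons w ws ih =>
    simp only [List.foldl_cons, List.countP_cons]
    by_cases h : w.any (fun l => PySem.Set.contains broken l) = true
    · have hok : pvOk broken w = false := by simp only [pvOk, h, Bool.not_true]
      rw [if_neg (not_not_intro h), ih, hok]
      simp
    · have hok : pvOk broken w = true := by
        simp only [pvOk, Bool.eq_false_iff.mpr, eq_false_of_ne_true h, Bool.not_false]
      rw [if_pos h, ih, hok]
      simp; push_cast; ring

-- Core invariant: B's fold from a state describing the partially read word `cur`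
-- finalizes to `count` plus the number of ok words that split₀.go still produces.
theorem main_inv (broken : PySem.Set Char) (rest cur : List Char) (count : Int) :
    (let st := rest.foldl (pvStep broken) (count, !cur.isEmpty, pvOk broken cur)
     if st.2.1 && st.2.2 then st.1 + 1 else st.1)
      = count + (((PySem.Chars.split₀.go rest cur []).countP (pvOk broken) : Nat) : Int) := by
  induction rest generalizing cur count with
  | nil =>
    simp only [List.foldl_nil, PySem.Chars.split₀.go]
    by_cases hc : cur.isEmpty = true
    · simp [hc]
    · have : (pvOk broken cur.reverse) = pvOk broken cur := by simp [pvOk]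
      by_cases hok : pvOk broken cur = true <;>
        simp [hc, hok, List.countP_cons, this]
  | cons c rest ih =>
    simp only [List.foldl_cons, PySem.Chars.split₀.go, pvStep]
    by_cases hs : PySem.Chars.isspace c = true
    · simp only [hs, if_true]
      by_cases hc : cur.isEmpty = true
      · have h0 : (!cur.isEmpty) = false := by simp [hc]
        simp only [hc, if_true, h0, Bool.false_and, if_false]
        have := ih [] count
        simpa [pvOk] using this
      · have h1 : (!cur.isEmpty) = true := by simp [hc]
        simp only [hc, if_false, h1, Bool.true_and]
        rw [go_acc rest [] [cur.reverse]]
        simp only [List.reverse_cons, List.reverse_nil, List.nil_append,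
          List.singleton_append, List.countP_cons]
        have hrev : pvOk broken cur.reverse = pvOk broken cur := by simp [pvOk]
        have hok0 : pvOk broken ([] : List Char) = true := by simp [pvOk]
        have hih := ih [] (if pvOk broken cur = true then count + 1 else count)
        rw [hok0] at hih
        simp only [List.isEmpty_nil, Bool.not_true] at hih
        simp only [Bool.not_false, Bool.true_and,
          if_neg (show ¬(false = true) by simp)] at hih ⊢
        rw [hih, List.countP_cons, hrev]
        by_cases hok : pvOk broken cur = true <;> simp [hok] <;> push_cast <;> ring
    · simp only [hs, if_false]
      have h1 : (!(c :: cur).isEmpty) = true := by simp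
      have h2 : (pvOk broken cur && !(PySem.Set.contains broken c)) = pvOk broken (c :: cur) := by
        simp only [pvOk, List.any_cons, Bool.not_or]
        exact Bool.and_comm _ _
      have := ih (c :: cur) count
      simp only [if_neg (by simp : ¬ (false = true))] at *
      rw [← this, h1, h2]

-- ===== VERDICT (by name: the statement is the Claim_ definition above) =====
theorem canBeTypedWords_spec : Claim_equal_canBeTypedWords := by
  intro text brokenLetters _
  show canBeTypedWords text brokenLetters = canBeTypedWords_alt text brokenLetters
  unfold canBeTypedWords canBeTypedWords_alt
  set broken := PySem.Set.ofList brokenLetters.toList with hb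
  have hA : (PySem.Str.split₀ text).foldl
      (fun count word => if ¬ (word.toList.any (fun l => PySem.Set.contains broken l)) = true then count + 1 else count) (0 : Int)
      = (PySem.Chars.split₀ text.toList).foldl
      (fun count w => if ¬ (w.any (fun l => PySem.Set.contains broken l)) = true then count + 1 else count) (0 : Int) := by
    rw [← PySem.Str.split₀_map_toList, List.foldl_map]
  have hB : ∀ st : Int × Bool × Bool, ∀ c,
      (if PySem.Chars.isspace c then
        ((if st.2.1 && st.2.2 then st.1 + 1 else st.1), false, true)
      else (st.1, true, st.2.2 && !(PySem.Set.contains broken c))) = pvStep broken st c := by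
    intro st c; rfl
  simp only [hA, foldA_count]
  have hinv := main_inv broken text.toList [] 0
  simp only [List.isEmpty_nil, Bool.not_true, pvOk, List.any_nil, Bool.not_false] at hinv
  simp only [funext fun st => funext (hB st)] at *
  rw [show PySem.Chars.split₀ text.toList = PySem.Chars.split₀.go text.toList [] [] from rfl] at *
  omega
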